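-- pv_equiv track=rewrite | github.com/nsakib1017/pyllmpatch | utils/reattach_source_code_object.py | _span_to_indices
-- ===== SOURCE A (Python) =====
-- class ReattachError(RuntimeError):
--     pass
--
-- def _span_to_indices(
--     text: str,
--     start_line: int,
--     start_col: int,
--     end_line: int,
--     end_col: int,
-- ) -> tuple[int, int]:
--     lines = text.splitlines(keepends=True)
--     if start_line < 1 or end_line < 1 or start_line > len(lines) or end_line > len(lines):
--         raise ReattachError("Mapped span is outside the source file bounds")
--
--     offsets = [0]
--     for line in lines:
--         offsets.append(offsets[-1] + len(line))
--     start_index = offsets[start_line - 1] + start_col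
--     end_index = offsets[end_line - 1] + end_col
--     return start_index, end_index
-- ===== SOURCE B (Python) =====
-- class ReattachError(RuntimeError):
--     pass
--
-- def _span_to_indices(
--     text: str,
--     start_line: int,
--     start_col: int,
--     end_line: int,
--     end_col: int,
-- ) -> tuple[int, int]:
--     lines = text.splitlines(keepends=True)
--     if start_line < 1 or end_line < 1 or start_line > len(lines) or end_line > len(lines):
--         raise ReattachError("Mapped span is outside the source file bounds")
--
--     start_index = sum(len(l) for l in lines[:start_line - 1]) + start_col
--     end_index = sum(len(l) for l in lines[:end_line - 1]) + end_col
--     return start_index, end_index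
-- ===== Notes on version B (the rewrite author's own statement) =====
-- stated objective: simpler
-- what changed: Dropped the cumulative offsets table entirely: each index is computed directly as the sum of the lengths of the preceding lines (a slice-and-sum per endpoint) instead of building a prefix-sum list and indexing into it.
import Mathlib
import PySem

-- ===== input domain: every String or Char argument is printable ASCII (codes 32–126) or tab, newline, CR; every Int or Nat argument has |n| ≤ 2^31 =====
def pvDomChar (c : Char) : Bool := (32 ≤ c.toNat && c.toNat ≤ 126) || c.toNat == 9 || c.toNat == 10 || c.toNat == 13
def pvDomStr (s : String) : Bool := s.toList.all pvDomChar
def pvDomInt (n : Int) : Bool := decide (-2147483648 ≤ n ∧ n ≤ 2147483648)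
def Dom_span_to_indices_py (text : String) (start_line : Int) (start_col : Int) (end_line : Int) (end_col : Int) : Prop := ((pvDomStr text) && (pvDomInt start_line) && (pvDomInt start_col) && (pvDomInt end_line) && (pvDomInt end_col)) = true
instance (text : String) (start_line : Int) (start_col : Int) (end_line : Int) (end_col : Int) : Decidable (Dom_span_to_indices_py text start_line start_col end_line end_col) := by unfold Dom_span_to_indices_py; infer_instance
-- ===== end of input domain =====

-- B drops A's cumulative offsets table: each endpoint is resolved by summing the lengths of the preceding lines directly.
-- Equivalence of return values is proved on Pre_ (A's in-bounds guard); outside Pre_ both Pythons raise ReattachError.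

-- ===== PORT A =====
-- text.splitlines(keepends=True): exact on the Dom character set (printable ASCII, tab, '\n', '\r'),
-- whose only line terminators are '\n', '\r' and '\r\n'.  (PySem.Str.splitlines drops the ends, so this is hand-ported.)
def pvSplitKeepGo (cur : List Char) : List Char → List (List Char)
  | [] => if cur = [] then [] else [cur.reverse]
  | '\r' :: '\n' :: rest => (cur.reverse ++ ['\r', '\n']) :: pvSplitKeepGo [] rest
  | '\n' :: rest => (cur.reverse ++ ['\n']) :: pvSplitKeepGo [] rest
  | '\r' :: rest => (cur.reverse ++ ['\r']) :: pvSplitKeepGo [] rest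
  | c :: rest => pvSplitKeepGo (c :: cur) rest

def span_to_indices_py (text : String) (start_line : Int) (start_col : Int) (end_line : Int) (end_col : Int) : Int × Int :=
  let lines := pvSplitKeepGo [] text.toList
  if start_line < 1 || end_line < 1 || start_line > (lines.length : Int) || end_line > (lines.length : Int) then
    (0, 0)  -- Python raises ReattachError here; excluded by Pre_
  else
    let offsets := lines.foldl (fun acc line => acc ++ [((PySem.List.pyGet? acc (-1)).getD 0) + (line.length : Int)]) [(0 : Int)]
    (((PySem.List.pyGet? offsets (start_line - 1)).getD 0) + start_col,
     ((PySem.List.pyGet? offsets (end_line - 1)).getD 0) + end_col)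

-- ===== PORT B =====
def span_to_indices_py_alt (text : String) (start_line : Int) (start_col : Int) (end_line : Int) (end_col : Int) : Int × Int :=
  let lines := pvSplitKeepGo [] text.toList
  if start_line < 1 || end_line < 1 || start_line > (lines.length : Int) || end_line > (lines.length : Int) then
    (0, 0)  -- Python raises ReattachError here; excluded by Pre_
  else
    (((PySem.List.slice lines none (some (start_line - 1))).map (fun l => (l.length : Int))).sum + start_col,
     ((PySem.List.slice lines none (some (end_line - 1))).map (fun l => (l.length : Int))).sum + end_col)

-- ===== PRECONDITION & SPEC =====
-- Pre_ is exactly A's in-bounds guard: both line numbers name an existing line of the text; outside it A raises ReattachError.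
-- (stated with the library line-splitter PySem.Str.splitlines, whose line count equals keepends-splitlines' on Dom)
def Pre_span_to_indices_py (text : String) (start_line : Int) (start_col : Int) (end_line : Int) (end_col : Int) : Prop :=
  1 ≤ start_line ∧ 1 ≤ end_line ∧
  start_line ≤ ((PySem.Str.splitlines text).length : Int) ∧ end_line ≤ ((PySem.Str.splitlines text).length : Int)
instance (text : String) (start_line : Int) (start_col : Int) (end_line : Int) (end_col : Int) : Decidable (Pre_span_to_indices_py text start_line start_col end_line end_col) := by unfold Pre_span_to_indices_py; infer_instance

def pvWitness_span_to_indices_py : String × Int × Int × Int × Int := ("ab\ncd\r\nef", 1, 1, 3, 2)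

def Spec_span_to_indices_py (text : String) (start_line : Int) (start_col : Int) (end_line : Int) (end_col : Int) (out : Int × Int) : Prop := out = span_to_indices_py_alt text start_line start_col end_line end_col
instance (text : String) (start_line : Int) (start_col : Int) (end_line : Int) (end_col : Int) (out : Int × Int) : Decidable (Spec_span_to_indices_py text start_line start_col end_line end_col out) := by unfold Spec_span_to_indices_py; infer_instance

-- ===== CLAIM (what is proved, stated in full; the proofs are below) =====
def Claim_equal_span_to_indices_py : Prop := ∀ (text : String) (start_line : Int) (start_col : Int) (end_line : Int) (end_col : Int), Dom_span_to_indices_py text start_line start_col end_line end_col → Pre_span_to_indices_py text start_line start_col end_line end_col → Spec_span_to_indices_py text start_line start_col end_line end_col (span_to_indices_py text start_line start_col end_line end_col)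

-- ===== LEMMAS AND PROOFS =====

-- on Dom characters the library splitter's break predicate is exactly '\n'-or-'\r'
theorem pvGo_len (isB : Char → Bool)
    (hB : ∀ c, pvDomChar c = true → isB c = (decide (c = '\n') || decide (c = '\r')))
    (cur s : List Char) :
    s.all pvDomChar = true → ∀ acc,
      (PySem.Chars.splitlines.go isB s cur acc).length = acc.length + (pvSplitKeepGo cur s).length := by
  induction cur, s using pvSplitKeepGo.induct with
  | case1 =>
    intro _ acc
    simp [PySem.Chars.splitlines.go, pvSplitKeepGo]
  | case2 cur hcur =>
    intro _ acc
    simp [PySem.Chars.splitlines.go, pvSplitKeepGo, hcur, List.isEmpty_iff]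
  | case3 cur rest ih =>
    intro hdom acc
    simp only [List.all_cons, Bool.and_eq_true] at hdom
    simp [PySem.Chars.splitlines.go, pvSplitKeepGo, ih hdom.2.2]; omega
  | case4 cur rest ih =>
    intro hdom acc
    simp only [List.all_cons, Bool.and_eq_true] at hdom
    have hb : isB '\n' = true := by rw [hB _ hdom.1]; decide
    simp [PySem.Chars.splitlines.go, pvSplitKeepGo, hb, ih hdom.2]; omega
  | case5 cur rest hne ih =>
    intro hdom acc
    simp only [List.all_cons, Bool.and_eq_true] at hdom
    have hb : isB '\r' = true := by rw [hB _ hdom.1]; decide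
    have hside : ∀ (r1 : List Char), ('\r' : Char) = '\r' → rest = '\n' :: r1 → False := fun r1 _ h => hne r1 h
    rw [PySem.Chars.splitlines.go.eq_3 _ _ _ _ _ hside, pvSplitKeepGo.eq_4 _ _ hne]
    rw [hb, if_pos rfl]
    simp [ih hdom.2]; omega
  | case6 cur c rest h1 h2 h3 ih =>
    intro hdom acc
    simp only [List.all_cons, Bool.and_eq_true] at hdom
    have hb : isB c = false := by
      rw [hB _ hdom.1]
      simp only [Bool.or_eq_false_iff, decide_eq_false_iff_not]
      exact ⟨h2, h3⟩
    rw [PySem.Chars.splitlines.go.eq_3 _ _ _ _ _ h1, pvSplitKeepGo.eq_5 _ _ _ h1 h2 h3]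
    rw [hb]
    simp [ih hdom.2]

theorem pvSplitlines_len (s : List Char) (hdom : s.all pvDomChar = true) :
    (PySem.Chars.splitlines s).length = (pvSplitKeepGo [] s).length := by
  have hB : ∀ c : Char, pvDomChar c = true →
      (decide (c.toNat = 10) || decide (c.toNat = 13) || decide (c.toNat = 11) || decide (c.toNat = 12) ||
        decide (c.toNat = 28) || decide (c.toNat = 29) || decide (c.toNat = 30) || decide (c.toNat = 133) ||
        decide (c.toNat = 8232) || decide (c.toNat = 8233))
      = (decide (c = '\n') || decide (c = '\r')) := by
    intro c hc
    have e1 : decide (c = '\n') = decide (c.toNat = 10) :=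
      decide_eq_decide.mpr ⟨fun h => by subst h; rfl, fun h => Char.ext (UInt32.toNat_inj.mp h)⟩
    have e2 : decide (c = '\r') = decide (c.toNat = 13) :=
      decide_eq_decide.mpr ⟨fun h => by subst h; rfl, fun h => Char.ext (UInt32.toNat_inj.mp h)⟩
    simp only [pvDomChar, Bool.or_eq_true, Bool.and_eq_true, decide_eq_true_eq, beq_iff_eq] at hc
    have h11 : ¬ (c.toNat = 11) := by omega
    have h12 : ¬ (c.toNat = 12) := by omega
    have h28 : ¬ (c.toNat = 28) := by omega
    have h29 : ¬ (c.toNat = 29) := by omega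
    have h30 : ¬ (c.toNat = 30) := by omega
    have h133 : ¬ (c.toNat = 133) := by omega
    have h8232 : ¬ (c.toNat = 8232) := by omega
    have h8233 : ¬ (c.toNat = 8233) := by omega
    rw [e1, e2]
    simp [h11, h12, h28, h29, h30, h133, h8232, h8233]
  unfold PySem.Chars.splitlines
  rw [pvGo_len _ hB [] s hdom []]
  simp

-- proof-side model of A's offsets loop: the partial sums it appends after the leading 0
def pvOffs (s : Int) : List (List Char) → List Int
  | [] => []
  | l :: ls => (s + l.length) :: pvOffs (s + l.length) ls

theorem pvOffs_length (s : Int) (ls : List (List Char)) : (pvOffs s ls).length = ls.length := by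
  induction ls generalizing s with
  | nil => rfl
  | cons l ls ih => simp [pvOffs, ih]

theorem foldl_offsets (ls : List (List Char)) :
    ∀ (acc : List Int), acc ≠ [] →
      ls.foldl (fun acc line => acc ++ [((PySem.List.pyGet? acc (-1)).getD 0) + (line.length : Int)]) acc
        = acc ++ pvOffs ((PySem.List.pyGet? acc (-1)).getD 0) ls := by
  induction ls with
  | nil => intro acc _; simp [pvOffs]
  | cons l ls ih =>
    intro acc hacc
    have h1 : acc ++ [((PySem.List.pyGet? acc (-1)).getD 0) + (l.length : Int)] ≠ [] := by simp
    simp only [List.foldl_cons, ih _ h1, pvOffs]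
    rw [PySem.List.pyGet?_neg_one_append_singleton]
    simp

theorem pvOffs_getElem (ls : List (List Char)) :
    ∀ (s : Int) (i : Nat) (h : i < ls.length),
      (pvOffs s ls)[i]'(by rw [pvOffs_length]; exact h)
        = s + (((ls.take (i + 1)).map (fun l => (l.length : Int))).sum) := by
  induction ls with
  | nil => intro s i h; simp at h
  | cons l ls ih =>
    intro s i h
    cases i with
    | zero => simp [pvOffs]
    | succ j =>
      have hj : j < ls.length := by simpa using h
      simp only [pvOffs, List.getElem_cons_succ, ih _ j hj, List.take_succ_cons, List.map_cons,
        List.sum_cons]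
      ring

-- both ports' index/sum reduce to the same partial sum of line lengths
theorem offsets_get (ls : List (List Char)) (k : Nat) (hk : k ≤ ls.length) :
    ((PySem.List.pyGet?
        (ls.foldl (fun acc line => acc ++ [((PySem.List.pyGet? acc (-1)).getD 0) + (line.length : Int)]) [(0 : Int)])
        (k : Int)).getD 0)
      = ((ls.take k).map (fun l => (l.length : Int))).sum := by
  rw [foldl_offsets ls [(0 : Int)] (by simp)]
  have h0 : ((PySem.List.pyGet? [(0 : Int)] (-1)).getD 0) = 0 := by decide
  rw [h0]
  rw [PySem.List.pyGet?_natCast]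
  cases k with
  | zero => simp
  | succ j =>
    have hj : j < ls.length := by omega
    have hlen : j + 1 ≤ ([(0 : Int)] ++ pvOffs 0 ls).length := by
      simp [pvOffs_length]; omega
    have : ([(0 : Int)] ++ pvOffs 0 ls)[j + 1]? = some ((pvOffs 0 ls)[j]'(by rw [pvOffs_length]; exact hj)) := by
      rw [List.getElem?_eq_getElem (by simp [pvOffs_length]; omega)]
      congr 1
    rw [this]
    simp only [Option.getD_some]
    have := pvOffs_getElem ls 0 j hj
    rw [this]; simp

-- ===== VERDICT (by name: the statement is the Claim_ definition above) =====
theorem span_to_indices_py_spec : Claim_equal_span_to_indices_py := by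
  intro text sl sc el ec hdm hpre
  obtain ⟨h1, h2, h3, h4⟩ := hpre
  unfold Spec_span_to_indices_py span_to_indices_py span_to_indices_py_alt
  set ls := pvSplitKeepGo [] text.toList with hls
  have hlen : ((PySem.Str.splitlines text).length : Int) = (ls.length : Int) := by
    have hd : text.toList.all pvDomChar = true := by
      have h := hdm
      simp only [Dom_span_to_indices_py, pvDomStr, Bool.and_eq_true] at h
      exact h.1.1.1.1
    simp only [PySem.Str.splitlines, List.length_map, hls]
    rw [pvSplitlines_len text.toList hd]
  rw [hlen] at h3 h4
  have hguard : (sl < 1 || el < 1 || sl > (ls.length : Int) || el > (ls.length : Int)) = false := by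
    simp; omega
  simp only [hguard, Bool.false_eq_true, if_false]
  have hsl : sl - 1 = (((sl - 1).toNat : Nat) : Int) := by omega
  have hel : el - 1 = (((el - 1).toNat : Nat) : Int) := by omega
  have hsl' : (sl - 1).toNat ≤ ls.length := by omega
  have hel' : (el - 1).toNat ≤ ls.length := by omega
  rw [hsl, hel, offsets_get ls _ hsl', offsets_get ls _ hel']
  rw [← hsl, ← hel]
  rw [PySem.List.slice_to _ (by omega : (0:Int) ≤ sl - 1)]
  rw [PySem.List.slice_to _ (by omega : (0:Int) ≤ el - 1)]
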